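-- pv_equiv track=rewrite | github.com/vadymshturkhal/algorithms | algorithms/break_number_to_ordered_sum_of_terms.py | break_number_to_ordered_sum_of_terms
-- ===== SOURCE A (Python) =====
-- def break_number_to_ordered_sum_of_terms(number: int, terms=None, memoize=None):
--     """
--         Assume number >= 0.
--         Default terms from 1 to number.
--         Returns quantity of ordered sum of terms from "terms".
--         Theorem:
--             F(n: [n1, n2,...,nk]) = F(n - n1: [n1, n2,...,nk])
--             + F(n - n2: [n1, n2,...,nk])
--             + ...
--             + F(n - nk: [n1, n2,...,nk]).
--             F(0: [n1, n2,...,nk]) = 1.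
--             F(-n: [n1, n2,...,nk]) = 0
--         Theorem:
--             F(n: [n1, n2,...,nk]) = 2**(n - 1)
--     """
--     if number == 0:
--         return 1
--     if number < 0:
--         return 0
--
--     if terms is None:
--         terms = [_ for _ in range(1, number + 1)]
--
--     if memoize is None:
--         memoize = {}
--
--     current_sum = 0
--     for term in terms:
--         current_term = number - term
--         if memoize.get(current_term) is None:
--             current_sums_quantity = break_number_to_ordered_sum_of_terms(current_term, terms, memoize)
--             memoize[current_term] = current_sums_quantity
--         else:
--             current_sums_quantity = memoize[current_term]
--
--         current_sum += current_sums_quantity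
--
--     return current_sum
-- ===== SOURCE B (Python) =====
-- def break_number_to_ordered_sum_of_terms(number: int, terms=None, memoize=None):
--     """Iterative sparse DP instead of A's top-down memoized recursion: collect the
--     reachable states by a worklist search, then fill them in ascending order.
--
--     Matches A's return value; unlike A it does not mutate a caller-supplied
--     memoize dict (return-value equivalence only).
--     """
--     if number == 0:
--         return 1
--     if number < 0:
--         return 0
--
--     if terms is None:
--         terms = [_ for _ in range(1, number + 1)]
--
--     mem = memoize if memoize is not None else {}
--
--     # states whose value must actually be computed (not supplied by mem)
--     stack = [number]
--     seen = {number}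
--     while stack:
--         m = stack.pop()
--         for t in terms:
--             c = m - t
--             if c > 0 and c not in mem and c not in seen:
--                 seen.add(c)
--                 stack.append(c)
--
--     dp = {}
--     for m in sorted(seen):
--         dp[m] = sum(mem[c] if c in mem else 1 if c == 0 else 0 if c < 0 else dp[c]
--                     for c in (m - t for t in terms))
--     return dp[number]
-- ===== Notes on version B (the rewrite author's own statement) =====
-- stated objective: alternative
-- what changed: Replaced the top-down memoized recursion (which threads a mutable dict through recursive calls) by an iterative two-phase algorithm: a worklist search first collects exactly the states whose value must be computed, then a sparse DP fills them in ascending order, consulting caller-supplied memoize entries as overrides; equivalence is about the return value only (A mutates a caller-supplied memoize dict, B does not).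
-- outside the precondition, e.g. on break_number_to_ordered_sum_of_terms(2, [-1, 2], {4: 5, 1: 100}): A returns 106, B raises KeyError
import Mathlib
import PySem

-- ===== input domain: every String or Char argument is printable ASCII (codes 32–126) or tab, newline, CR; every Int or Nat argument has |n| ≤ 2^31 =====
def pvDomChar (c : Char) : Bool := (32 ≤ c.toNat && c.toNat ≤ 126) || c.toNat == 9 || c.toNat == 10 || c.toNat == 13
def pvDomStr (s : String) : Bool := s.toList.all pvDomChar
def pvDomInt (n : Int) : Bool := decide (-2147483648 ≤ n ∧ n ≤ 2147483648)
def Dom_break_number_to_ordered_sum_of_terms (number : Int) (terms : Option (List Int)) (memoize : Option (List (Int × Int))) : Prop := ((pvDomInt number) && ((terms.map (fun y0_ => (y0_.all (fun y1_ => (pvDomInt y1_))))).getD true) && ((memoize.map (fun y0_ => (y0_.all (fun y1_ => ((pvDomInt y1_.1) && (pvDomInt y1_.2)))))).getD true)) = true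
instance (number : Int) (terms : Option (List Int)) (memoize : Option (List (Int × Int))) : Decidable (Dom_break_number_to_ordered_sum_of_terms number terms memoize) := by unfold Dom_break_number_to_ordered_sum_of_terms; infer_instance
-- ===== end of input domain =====

-- B replaces A's top-down memoized recursion by an iterative worklist collection of the
-- needed states followed by a sparse DP in ascending order (return-value equivalence only:
-- A mutates a caller-supplied memoize dict, B does not).


-- ===== PORT A =====
-- A's recursion is not structurally decreasing (it recurses on number - term), so the
-- port carries a fuel counter; fuel number.toNat + 2 exceeds A's recursion depth on every
-- input admitted by Pre_ (all terms ≥ 1), so the fuel-exhaustion branch is unreachable there.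
mutual
  -- one call of A (after the top-level default handling of terms/memoize)
  def pvAGo (fuel : Nat) (number : Int) (terms : List Int) (mem : PySem.Dict Int Int) :
      Int × PySem.Dict Int Int :=
    match fuel with
    | 0 => (0, mem)   -- fuel exhausted (unreachable under Pre_)
    | fuel' + 1 =>
      if number = 0 then (1, mem)
      else if number < 0 then (0, mem)
      else pvALoop fuel' number terms terms 0 mem
  termination_by (fuel, 0, 0)

  -- the 'for term in terms' loop, threading (current_sum, memoize)
  def pvALoop (fuel : Nat) (number : Int) (terms : List Int) (rest : List Int)
      (s : Int) (mem : PySem.Dict Int Int) : Int × PySem.Dict Int Int :=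
    match rest with
    | [] => (s, mem)
    | t :: rest' =>
      match PySem.Dict.get? mem (number - t) with
      | some q => pvALoop fuel number terms rest' (s + q) mem
      | none =>
        let r := pvAGo fuel (number - t) terms mem
        pvALoop fuel number terms rest' (s + r.1) (PySem.Dict.insert r.2 (number - t) r.1)
  termination_by (fuel, 1, rest.length)
end

def break_number_to_ordered_sum_of_terms (number : Int) (terms : Option (List Int)) (memoize : Option (List (Int × Int))) : Int :=
  if number = 0 then 1
  else if number < 0 then 0
  else
    let ts := match terms with
      | none => PySem.List.pyRange 1 (number + 1) 1
      | some ts => ts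
    let mem : PySem.Dict Int Int := match memoize with
      | none => PySem.Dict.empty
      | some m => PySem.Dict.ofList m
    (pvAGo (number.toNat + 2) number ts mem).1

-- ===== PORT B =====
-- body of B's inner 'for t in terms' loop of the worklist search:
-- 'c = m - t; if c > 0 and c not in mem and c not in seen: seen.add(c); stack.append(c)'
def pvBfsStep (mem : PySem.Dict Int Int) (m : Int) (st : List Int × PySem.Set Int) (t : Int) :
    List Int × PySem.Set Int :=
  let c := m - t
  if 0 < c ∧ PySem.Dict.contains mem c = false ∧ c ∉ st.2
  then (c :: st.1, PySem.Set.add st.2 c)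
  else st

-- B's 'while stack:' worklist loop. It is not structurally decreasing, so the port
-- carries a fuel counter; fuel number.toNat + 1 exceeds the number of iterations on
-- every input admitted by Pre_, so the fuel-exhaustion branch is unreachable there.
def pvBfs (ts : List Int) (mem : PySem.Dict Int Int) :
    Nat → List Int → PySem.Set Int → PySem.Set Int
  | 0, _, seen => seen   -- fuel exhausted (unreachable under Pre_)
  | _ + 1, [], seen => seen
  | fuel + 1, m :: stack, seen =>
    let st := ts.foldl (pvBfsStep mem m) (stack, seen)
    pvBfs ts mem fuel st.1 st.2

-- one dp value: 'sum(mem[c] if c in mem else 1 if c == 0 else 0 if c < 0 else dp[c] ...)'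
-- (dp[c] raises KeyError where get? is none; that point is unreachable under Pre_)
def pvDpCell (ts : List Int) (mem : PySem.Dict Int Int) (dp : PySem.Dict Int Int) (m : Int) : Int :=
  ts.foldl (fun s t =>
    s + (match PySem.Dict.get? mem (m - t) with
         | some v => v
         | none =>
           if m - t = 0 then 1
           else if m - t < 0 then 0
           else (PySem.Dict.get? dp (m - t)).getD 0)) 0

-- B's 'for m in sorted(seen): dp[m] = ...' loop
def pvDpLoop (ts : List Int) (mem : PySem.Dict Int Int) :
    List Int → PySem.Dict Int Int → PySem.Dict Int Int
  | [], dp => dp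
  | m :: rest, dp => pvDpLoop ts mem rest (PySem.Dict.insert dp m (pvDpCell ts mem dp m))

def break_number_to_ordered_sum_of_terms_alt (number : Int) (terms : Option (List Int)) (memoize : Option (List (Int × Int))) : Int :=
  if number = 0 then 1
  else if number < 0 then 0
  else
    let ts := match terms with
      | none => PySem.List.pyRange 1 (number + 1) 1
      | some ts => ts
    let mem : PySem.Dict Int Int := match memoize with
      | none => PySem.Dict.empty
      | some m => PySem.Dict.ofList m
    let seen := pvBfs ts mem (number.toNat + 1) [number] (PySem.Set.ofList [number])
    let dp := pvDpLoop ts mem (PySem.List.sorted seen (fun x => x) false) PySem.Dict.empty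
    (PySem.Dict.get? dp number).getD 0   -- 'return dp[number]' (KeyError unreachable under Pre_)

-- ===== PRECONDITION & SPEC =====
-- Pre_ excludes number > 0 together with an explicit terms list containing a term ≤ 0:
-- there A either recurses forever (RecursionError) or, when memoize entries happen to
-- short-circuit the recursion, may return a value at which B's ascending fill order
-- breaks down and raises KeyError (see claim.json cites).
def Pre_break_number_to_ordered_sum_of_terms (number : Int) (terms : Option (List Int)) (memoize : Option (List (Int × Int))) : Prop :=
  number ≤ 0 ∨ ∀ t ∈ terms.getD [], 1 ≤ t
instance (number : Int) (terms : Option (List Int)) (memoize : Option (List (Int × Int))) : Decidable (Pre_break_number_to_ordered_sum_of_terms number terms memoize) := by unfold Pre_break_number_to_ordered_sum_of_terms; infer_instance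

def pvWitness_break_number_to_ordered_sum_of_terms : Int × Option (List Int) × (Option (List (Int × Int))) := (4, some [1, 2], some [(1, 7)])

def Spec_break_number_to_ordered_sum_of_terms (number : Int) (terms : Option (List Int)) (memoize : Option (List (Int × Int))) (out : Int) : Prop := out = break_number_to_ordered_sum_of_terms_alt number terms memoize
instance (number : Int) (terms : Option (List Int)) (memoize : Option (List (Int × Int))) (out : Int) : Decidable (Spec_break_number_to_ordered_sum_of_terms number terms memoize out) := by unfold Spec_break_number_to_ordered_sum_of_terms; infer_instance

-- ===== CLAIM (what is proved, stated in full; the proofs are below) =====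
def Claim_equal_break_number_to_ordered_sum_of_terms : Prop := ∀ (number : Int) (terms : Option (List Int)) (memoize : Option (List (Int × Int))), Dom_break_number_to_ordered_sum_of_terms number terms memoize → Pre_break_number_to_ordered_sum_of_terms number terms memoize → Spec_break_number_to_ordered_sum_of_terms number terms memoize (break_number_to_ordered_sum_of_terms number terms memoize)

-- ===== LEMMAS AND PROOFS =====

-- Proof-side reference: the dense table of cell values (used only to DEFINE pvV below,
-- the common value both programs compute at each state; neither port computes it).
def pvBCell (ts : List Int) (mem : PySem.Dict Int Int) (g : List Int) (m : Int) : Int :=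
  match PySem.Dict.get? mem m with
  | some v => v
  | none =>
    if m = 0 then 1
    else ts.foldl (fun s t =>
      s + (if m - t ≥ 0 then (PySem.List.pyGet? g (m - t)).getD 0
           else PySem.Dict.getD mem (m - t) 0)) 0

def pvBTab (ts : List Int) (mem : PySem.Dict Int Int) : Nat → List Int
  | 0 => []
  | n + 1 => pvBTab ts mem n ++ [pvBCell ts mem (pvBTab ts mem n) (n : Int)]

-- the value the k-th state ends up holding (for k < 0: what the 'mem.get(k, 0)' fallback yields)
def pvV (ts : List Int) (mem : PySem.Dict Int Int) (k : Int) : Int :=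
  if 0 ≤ k then (pvBTab ts mem (k.toNat + 1)).getD k.toNat 0
  else PySem.Dict.getD mem k 0

theorem pvBTab_length (ts : List Int) (mem : PySem.Dict Int Int) (n : Nat) :
    (pvBTab ts mem n).length = n := by
  induction n with
  | zero => rfl
  | succ n ih => simp [pvBTab, ih]

theorem pvBTab_prefix (ts : List Int) (mem : PySem.Dict Int Int) {m n : Nat} (h : m ≤ n) :
    pvBTab ts mem m <+: pvBTab ts mem n := by
  induction n with
  | zero => simp_all
  | succ n ih =>
    rcases Nat.lt_or_ge m (n + 1) with h' | h'
    · exact (ih (by omega)).trans ⟨_, rfl⟩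
    · have : m = n + 1 := by omega
      subst this; exact List.prefix_refl _

theorem pvBTab_getD (ts : List Int) (mem : PySem.Dict Int Int) {j n : Nat} (h : j < n) :
    (pvBTab ts mem n).getD j 0 = pvV ts mem (j : Int) := by
  have hpre := pvBTab_prefix ts mem (show j + 1 ≤ n by omega)
  have h1 : j < (pvBTab ts mem (j + 1)).length := by rw [pvBTab_length]; omega
  have h2 : j < (pvBTab ts mem n).length := by rw [pvBTab_length]; omega
  have he := List.IsPrefix.getElem hpre h1
  rw [pvV, if_pos (by positivity), Int.toNat_natCast]
  simp only [List.getD_eq_getElem?_getD, List.getElem?_eq_getElem h1,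
    List.getElem?_eq_getElem h2, Option.getD_some]
  exact he.symm

-- the reference cell lookup 'g[m-t] if m-t >= 0 else mem.get(m-t, 0)' has value pvV (m - t)
theorem pvLookup_eq (ts : List Int) (mem : PySem.Dict Int Int) {n : Nat} {m t : Int}
    (hm : 0 ≤ m) (hmn : m.toNat ≤ n) (ht : 1 ≤ t) :
    (if m - t ≥ 0 then (PySem.List.pyGet? (pvBTab ts mem n) (m - t)).getD 0
     else PySem.Dict.getD mem (m - t) 0) = pvV ts mem (m - t) := by
  by_cases hnn : m - t ≥ 0
  · have hjlt : (m - t).toNat < n := by omega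
    rw [if_pos hnn, PySem.List.pyGet?_of_nonneg _ (by omega)]
    have h2 : (m - t).toNat < (pvBTab ts mem n).length := by rw [pvBTab_length]; omega
    have := pvBTab_getD ts mem hjlt
    rw [Int.toNat_of_nonneg hnn] at this
    rw [← this]
    simp [List.getD_eq_getElem?_getD]
  · rw [if_neg hnn, pvV, if_neg (by omega)]

-- for k ≥ 0, pvV k is the cell formula evaluated on the table of the first k cells
theorem pvV_natCast (ts : List Int) (mem : PySem.Dict Int Int) (j : Nat) :
    pvV ts mem (j : Int) = pvBCell ts mem (pvBTab ts mem j) (j : Int) := by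
  rw [pvV, if_pos (by positivity), Int.toNat_natCast]
  show (pvBTab ts mem j ++ [pvBCell ts mem (pvBTab ts mem j) (j : Int)]).getD j 0 = _
  rw [List.getD_eq_getElem?_getD, List.getElem?_append_right (by rw [pvBTab_length])]
  simp [pvBTab_length]

-- a key present in mem keeps its mem value
theorem pvV_of_mem (ts : List Int) (mem : PySem.Dict Int Int) {k : Int} {v : Int}
    (hk : PySem.Dict.get? mem k = some v) : pvV ts mem k = v := by
  by_cases h0 : 0 ≤ k
  · have hc : ((k.toNat : Nat) : Int) = k := Int.toNat_of_nonneg h0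
    have := pvV_natCast ts mem k.toNat
    rw [hc] at this
    rw [this, pvBCell, hk]
  · rw [pvV, if_neg h0, PySem.Dict.getD_of_get?_eq_some mem 0 hk]

-- on a key absent from mem, pvV satisfies A's recurrence
theorem pvV_of_not_mem (ts : List Int) (mem : PySem.Dict Int Int) (pos : ∀ t ∈ ts, 1 ≤ t)
    {k : Int} (hk : PySem.Dict.get? mem k = none) :
    pvV ts mem k =
      if k = 0 then 1
      else if k < 0 then 0
      else ts.foldl (fun s t => s + pvV ts mem (k - t)) 0 := by
  by_cases h0 : 0 ≤ k
  · have hc : ((k.toNat : Nat) : Int) = k := Int.toNat_of_nonneg h0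
    have hv := pvV_natCast ts mem k.toNat
    rw [hc] at hv
    rw [hv, pvBCell, hk]
    by_cases hz : k = 0
    · simp [hz]
    · rw [if_neg hz, if_neg hz, if_neg (by omega)]
      refine PySem.List.foldl_congr_mem ts _ _ 0 ?_
      intro acc t ht
      rw [pvLookup_eq ts mem h0 (le_refl _) (pos t ht)]
  · rw [pvV, if_neg h0, PySem.Dict.getD_of_get?_eq_none mem 0 hk,
      if_neg (by omega), if_pos (by omega)]

-- invariants of A's threaded memoize dict, relative to the initial dict d0
def pvInv (ts : List Int) (d0 mem : PySem.Dict Int Int) : Prop :=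
  (∀ k v, PySem.Dict.get? d0 k = some v → PySem.Dict.get? mem k = some v) ∧
  (∀ k v, PySem.Dict.get? mem k = some v → v = pvV ts d0 k)

-- A's return value at a state, expressed through pvV
def pvFV (ts : List Int) (d0 : PySem.Dict Int Int) (m : Int) : Int :=
  if m = 0 then 1
  else if m < 0 then 0
  else ts.foldl (fun s t => s + pvV ts d0 (m - t)) 0

theorem pvFV_eq_V (ts : List Int) (d0 : PySem.Dict Int Int) (pos : ∀ t ∈ ts, 1 ≤ t)
    {k : Int} (hk : PySem.Dict.get? d0 k = none) : pvFV ts d0 k = pvV ts d0 k :=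
  (pvV_of_not_mem ts d0 pos hk).symm

theorem pvALoop_spec (ts : List Int) (d0 : PySem.Dict Int Int) (pos : ∀ t ∈ ts, 1 ≤ t) (fuel : Nat)
    (IH : ∀ m mem, m.toNat < fuel → pvInv ts d0 mem →
      (pvAGo fuel m ts mem).1 = pvFV ts d0 m ∧ pvInv ts d0 (pvAGo fuel m ts mem).2 ∧
      (∀ k v, PySem.Dict.get? mem k = some v →
        PySem.Dict.get? (pvAGo fuel m ts mem).2 k = some v))
    (number : Int) :
    ∀ rest s mem, (∀ t ∈ rest, (number - t).toNat < fuel) → pvInv ts d0 mem →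
      (pvALoop fuel number ts rest s mem).1
          = rest.foldl (fun a t => a + pvV ts d0 (number - t)) s ∧
      pvInv ts d0 (pvALoop fuel number ts rest s mem).2 ∧
      (∀ k v, PySem.Dict.get? mem k = some v →
        PySem.Dict.get? (pvALoop fuel number ts rest s mem).2 k = some v) := by
  intro rest
  induction rest with
  | nil => intro s mem _ hInv; rw [pvALoop]; exact ⟨rfl, hInv, fun _ _ h => h⟩
  | cons t rest' ih =>
    intro s mem hfu hInv
    rw [pvALoop]
    cases hget : PySem.Dict.get? mem (number - t) with
    | some q =>
      have hq : q = pvV ts d0 (number - t) := hInv.2 _ _ hget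
      simp only []
      have := ih (s + q) mem (fun t' ht' => hfu t' (by simp [ht'])) hInv
      refine ⟨?_, this.2.1, this.2.2⟩
      rw [this.1, hq]
      simp [List.foldl]
    | none =>
      have hd0 : PySem.Dict.get? d0 (number - t) = none := by
        cases hd : PySem.Dict.get? d0 (number - t) with
        | none => rfl
        | some v => rw [hInv.1 _ _ hd] at hget; cases hget
      have hA := IH (number - t) mem (hfu t (by simp)) hInv
      set r := pvAGo fuel (number - t) ts mem with hr
      have hval : r.1 = pvV ts d0 (number - t) := by
        rw [hA.1, pvFV_eq_V ts d0 pos hd0]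
      set mem'' := PySem.Dict.insert r.2 (number - t) r.1 with hmem''
      have hInv'' : pvInv ts d0 mem'' := by
        constructor
        · intro k v hkv
          rw [hmem'', PySem.Dict.get?_insert]
          have hne : k ≠ number - t := fun he => by rw [he, hd0] at hkv; cases hkv
          rw [if_neg hne]
          exact hA.2.2 _ _ (hInv.1 _ _ hkv)
        · intro k v hkv
          rw [hmem'', PySem.Dict.get?_insert] at hkv
          by_cases he : k = number - t
          · rw [if_pos he] at hkv
            cases hkv; rw [he, hval]
          · rw [if_neg he] at hkv
            exact hA.2.1.2 _ _ hkv
      have hext'' : ∀ k v, PySem.Dict.get? mem k = some v →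
          PySem.Dict.get? mem'' k = some v := by
        intro k v hkv
        have hne : k ≠ number - t := fun he => by rw [he, hget] at hkv; cases hkv
        rw [hmem'', PySem.Dict.get?_insert, if_neg hne]
        exact hA.2.2 _ _ hkv
      have := ih (s + r.1) mem'' (fun t' ht' => hfu t' (by simp [ht'])) hInv''
      refine ⟨?_, this.2.1, fun k v hkv => this.2.2 _ _ (hext'' _ _ hkv)⟩
      rw [this.1, hval]
      simp [List.foldl]

theorem pvAGo_spec (ts : List Int) (d0 : PySem.Dict Int Int) (pos : ∀ t ∈ ts, 1 ≤ t) :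
    ∀ fuel (m : Int) mem, m.toNat < fuel → pvInv ts d0 mem →
      (pvAGo fuel m ts mem).1 = pvFV ts d0 m ∧ pvInv ts d0 (pvAGo fuel m ts mem).2 ∧
      (∀ k v, PySem.Dict.get? mem k = some v →
        PySem.Dict.get? (pvAGo fuel m ts mem).2 k = some v) := by
  intro fuel
  induction fuel with
  | zero => intro m mem h; omega
  | succ fuel ih =>
    intro m mem hfu hInv
    rw [pvAGo]
    by_cases h0 : m = 0
    · simp only [if_pos h0]
      exact ⟨by rw [pvFV, if_pos h0], hInv, fun _ _ h => h⟩
    · rw [if_neg h0]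
      by_cases hneg : m < 0
      · simp only [if_pos hneg]
        exact ⟨by rw [pvFV, if_neg h0, if_pos hneg], hInv, fun _ _ h => h⟩
      · rw [if_neg hneg]
        have hloop := pvALoop_spec ts d0 pos fuel ih m ts 0 mem
          (fun t ht => by have := pos t ht; omega) hInv
        refine ⟨?_, hloop.2.1, hloop.2.2⟩
        rw [hloop.1, pvFV, if_neg h0, if_neg hneg]

-- A's top value
theorem pvA_value (number : Int) (ts : List Int) (d0 : PySem.Dict Int Int)
    (pos : ∀ t ∈ ts, 1 ≤ t) :
    (pvAGo (number.toNat + 2) number ts d0).1 = pvFV ts d0 number := by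
  have hInv0 : pvInv ts d0 d0 :=
    ⟨fun _ _ h => h, fun k v hkv => (pvV_of_mem ts d0 hkv).symm⟩
  exact (pvAGo_spec ts d0 pos (number.toNat + 2) number d0 (by omega) hInv0).1

-- ---------- B side ----------

-- one pass of the inner 'for t in terms' loop of the worklist search
theorem pvBfsFold_spec (mem : PySem.Dict Int Int) (m : Int) :
    ∀ (l : List Int) (stack : List Int) (seen : PySem.Set Int),
      (∀ x ∈ seen, x ∈ (l.foldl (pvBfsStep mem m) (stack, seen)).2) ∧
      (∀ x ∈ stack, x ∈ (l.foldl (pvBfsStep mem m) (stack, seen)).1) ∧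
      (∀ x ∈ (l.foldl (pvBfsStep mem m) (stack, seen)).2,
        x ∈ seen ∨ x ∈ (l.foldl (pvBfsStep mem m) (stack, seen)).1) ∧
      (∀ x ∈ (l.foldl (pvBfsStep mem m) (stack, seen)).1,
        x ∈ stack ∨ x ∈ (l.foldl (pvBfsStep mem m) (stack, seen)).2) ∧
      (seen.Nodup → ((l.foldl (pvBfsStep mem m) (stack, seen)).2).Nodup) ∧
      (∀ x ∈ (l.foldl (pvBfsStep mem m) (stack, seen)).2,
        x ∈ seen ∨ (0 < x ∧ PySem.Dict.get? mem x = none ∧ ∃ t ∈ l, x = m - t)) ∧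
      (∀ t ∈ l, 0 < m - t → PySem.Dict.get? mem (m - t) = none →
        (m - t) ∈ (l.foldl (pvBfsStep mem m) (stack, seen)).2) ∧
      ((l.foldl (pvBfsStep mem m) (stack, seen)).1.length + seen.length
        = stack.length + ((l.foldl (pvBfsStep mem m) (stack, seen)).2).length) := by
  intro l
  induction l with
  | nil =>
    intro stack seen
    exact ⟨fun _ h => h, fun _ h => h, fun _ h => Or.inl h, fun _ h => Or.inl h,
      fun h => h, fun _ h => Or.inl h, fun t ht => absurd ht (List.not_mem_nil),
      rfl⟩
  | cons t l ih =>
    intro stack seen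
    rw [List.foldl_cons]
    by_cases hc : 0 < m - t ∧ PySem.Dict.contains mem (m - t) = false ∧ (m - t) ∉ seen
    · have hstep : pvBfsStep mem m (stack, seen) t
          = ((m - t) :: stack, PySem.Set.add seen (m - t)) := by
        rw [pvBfsStep]; exact if_pos hc
      rw [hstep]
      obtain ⟨a, b, c, d, e, f, g, h⟩ := ih ((m - t) :: stack) (PySem.Set.add seen (m - t))
      have hmemnone : PySem.Dict.get? mem (m - t) = none :=
        (PySem.Dict.get?_eq_none_iff_contains mem (m - t)).mpr hc.2.1
      refine ⟨?_, ?_, ?_, ?_, ?_, ?_, ?_, ?_⟩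
      · intro x hx; exact a x ((PySem.Set.mem_add _ _ _).mpr (Or.inl hx))
      · intro x hx; exact b x (by simp [hx])
      · intro x hx
        rcases c x hx with hx' | hx'
        · rcases (PySem.Set.mem_add _ _ _).mp hx' with hx'' | hx''
          · exact Or.inl hx''
          · exact Or.inr (b _ (by simp [hx'']))
        · exact Or.inr hx'
      · intro x hx
        rcases d x hx with hx' | hx'
        · rcases List.mem_cons.mp hx' with hx'' | hx''
          · exact Or.inr (a _ ((PySem.Set.mem_add _ _ _).mpr (Or.inr hx'')))
          · exact Or.inl hx''
        · exact Or.inr hx'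
      · intro hnd
        exact e (PySem.Set.nodup_add seen _ hnd)
      · intro x hx
        rcases f x hx with hx' | hx'
        · rcases (PySem.Set.mem_add _ _ _).mp hx' with hx'' | hx''
          · exact Or.inl hx''
          · exact Or.inr ⟨by omega, by rw [hx'']; exact hmemnone, t, by simp, hx''⟩
        · obtain ⟨hx1, hx2, t', ht', hx3⟩ := hx'
          exact Or.inr ⟨hx1, hx2, t', by simp [ht'], hx3⟩
      · intro t' ht' h1 h2
        rcases List.mem_cons.mp ht' with ht'' | ht''
        · subst ht''
          exact a _ ((PySem.Set.mem_add _ _ _).mpr (Or.inr rfl))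
        · exact g t' ht'' h1 h2
      · rw [PySem.Set.add_of_not_mem hc.2.2] at h ⊢
        simp only [List.length_cons, List.length_append, List.length_nil] at h ⊢
        omega
    · have hstep : pvBfsStep mem m (stack, seen) t = (stack, seen) := by
        rw [pvBfsStep]; exact if_neg hc
      rw [hstep]
      obtain ⟨a, b, c, d, e, f, g, h⟩ := ih stack seen
      refine ⟨a, b, c, d, e, ?_, ?_, h⟩
      · intro x hx
        rcases f x hx with hx' | hx'
        · exact Or.inl hx'
        · obtain ⟨hx1, hx2, t', ht', hx3⟩ := hx'
          exact Or.inr ⟨hx1, hx2, t', by simp [ht'], hx3⟩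
      · intro t' ht' h1 h2
        rcases List.mem_cons.mp ht' with ht'' | ht''
        · rw [ht''] at h1 h2 ⊢
          -- the guard failed although 0 < m - t and m - t ∉ mem: so m - t ∈ seen already
          have hms : (m - t) ∈ seen := by
            by_contra hmem
            exact hc ⟨h1, (PySem.Dict.get?_eq_none_iff_contains mem (m - t)).mp h2, hmem⟩
          exact a _ hms
        · exact g t' ht'' h1 h2

-- the worklist search returns a superset of seen that is closed under expansion
theorem pvBfs_spec (ts : List Int) (mem : PySem.Dict Int Int) (number : Int)
    (pos : ∀ t ∈ ts, 1 ≤ t) (hn : 0 < number) :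
    ∀ fuel (stack : List Int) (seen : PySem.Set Int),
      stack.length + number.toNat < fuel + seen.length →
      number ∈ seen →
      seen.Nodup →
      (∀ x ∈ seen, 1 ≤ x ∧ x ≤ number) →
      (∀ x ∈ seen, x ≠ number → PySem.Dict.get? mem x = none) →
      (∀ x ∈ stack, x ∈ seen) →
      (∀ m ∈ seen, m ∉ stack → ∀ t ∈ ts, 0 < m - t →
        PySem.Dict.get? mem (m - t) = none → (m - t) ∈ seen) →
      (∀ x ∈ seen, x ∈ pvBfs ts mem fuel stack seen) ∧
      (pvBfs ts mem fuel stack seen).Nodup ∧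
      (∀ x ∈ pvBfs ts mem fuel stack seen, 1 ≤ x ∧ x ≤ number) ∧
      (∀ x ∈ pvBfs ts mem fuel stack seen, x ≠ number →
        PySem.Dict.get? mem x = none) ∧
      (∀ m ∈ pvBfs ts mem fuel stack seen, ∀ t ∈ ts, 0 < m - t →
        PySem.Dict.get? mem (m - t) = none → (m - t) ∈ pvBfs ts mem fuel stack seen) := by
  intro fuel
  induction fuel with
  | zero =>
    intro stack seen hfu _ hnd h3 _ _ _
    -- impossible: seen is a nodup subset of [1, number], so its length is at most number
    exfalso
    have hsub : seen ⊆ PySem.List.pyRange 1 (number + 1) 1 := by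
      intro x hx
      rw [PySem.List.mem_pyRange_one]
      have := h3 x hx; omega
    have hlen := (List.subperm_of_subset hnd hsub).length_le
    rw [PySem.List.length_pyRange_one] at hlen
    omega
  | succ fuel ih =>
    intro stack seen hfu h1 h2 h3 h4 h5 h6
    cases stack with
    | nil =>
      rw [pvBfs]
      refine ⟨fun _ h => h, h2, h3, h4, ?_⟩
      intro m hm t ht hpos hnone
      exact h6 m hm (List.not_mem_nil) t ht hpos hnone
    | cons m stack =>
      rw [pvBfs]
      obtain ⟨a, b, c, d, e, f, g, h⟩ := pvBfsFold_spec mem m ts stack seen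
      set st := ts.foldl (pvBfsStep mem m) (stack, seen) with hst
      have hmseen : m ∈ seen := h5 m (by simp)
      have hmbnd := h3 m hmseen
      obtain ⟨A1, A2, A3, A4, A5⟩ := ih st.1 st.2
        (by simp only [List.length_cons] at hfu; omega)
        (a _ h1) (e h2)
        (by -- bounds for all of st.2
          intro x hx
          rcases f x hx with hx' | hx'
          · exact h3 x hx'
          · obtain ⟨hx1, _, t, ht, hx3⟩ := hx'
            have := pos t ht; have := hmbnd; omega)
        (by -- mem-freeness
          intro x hx hxne
          rcases f x hx with hx' | hx'
          · exact h4 x hx' hxne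
          · exact hx'.2.1)
        (by -- new stack ⊆ new seen
          intro x hx
          rcases d x hx with hx' | hx'
          · exact a _ (h5 x (by simp [hx']))
          · exact hx')
        (by -- closure outside the new stack
          intro m' hm' hm'st t ht hpos hnone
          rcases c m' hm' with hseen | hstk
          · by_cases hmm : m' = m
            · subst hmm; exact g t ht hpos hnone
            · have hns : m' ∉ stack := fun hcn => hm'st (b _ hcn)
              have : m' ∉ m :: stack := by simp [hmm, hns]
              exact a _ (h6 m' hseen this t ht hpos hnone)
          · exact absurd hstk hm'st)
      exact ⟨fun x hx => A1 x (a x hx), A2, A3, A4, A5⟩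

-- the ascending dp fill computes pvFV at every collected state
theorem pvDpLoop_spec (ts : List Int) (mem : PySem.Dict Int Int) (S : List Int)
    (pos : ∀ t ∈ ts, 1 ≤ t)
    (hS3 : ∀ x ∈ S, 1 ≤ x)
    (hS5 : ∀ m ∈ S, ∀ t ∈ ts, 0 < m - t → PySem.Dict.get? mem (m - t) = none → (m - t) ∈ S) :
    ∀ (l : List Int) (dp : PySem.Dict Int Int),
      l.Pairwise (· < ·) → (∀ x ∈ l, x ∈ S) →
      (∀ c ∈ S, c ∉ l → PySem.Dict.get? dp c = some (pvFV ts mem c)) →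
      ∀ c ∈ S, PySem.Dict.get? (pvDpLoop ts mem l dp) c = some (pvFV ts mem c) := by
  intro l
  induction l with
  | nil =>
    intro dp _ _ hdp c hc
    rw [pvDpLoop]
    exact hdp c hc (List.not_mem_nil)
  | cons m rest ih =>
    intro dp hpw hsub hdp
    have hmS : m ∈ S := hsub m (by simp)
    have hrest_gt : ∀ x ∈ rest, m < x := fun x hx => (List.pairwise_cons.mp hpw).1 x hx
    -- the cell value is pvFV m
    have hcell : pvDpCell ts mem dp m = pvFV ts mem m := by
      rw [pvDpCell, pvFV, if_neg (by have := hS3 m hmS; omega),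
        if_neg (by have := hS3 m hmS; omega)]
      refine PySem.List.foldl_congr_mem ts _ _ 0 ?_
      intro acc t ht
      congr 1
      cases hmem : PySem.Dict.get? mem (m - t) with
      | some v => exact (pvV_of_mem ts mem hmem).symm
      | none =>
        by_cases hz : m - t = 0
        · rw [if_pos hz, pvV_of_not_mem ts mem pos hmem, if_pos hz]
        · rw [if_neg hz]
          by_cases hlt : m - t < 0
          · rw [if_pos hlt, pvV_of_not_mem ts mem pos hmem, if_neg hz, if_pos hlt]
          · rw [if_neg hlt]
            have hcS : (m - t) ∈ S := hS5 m hmS t ht (by omega) hmem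
            have hcnot : (m - t) ∉ m :: rest := by
              have := pos t ht
              intro hc
              rcases List.mem_cons.mp hc with hc' | hc'
              · omega
              · have := hrest_gt _ hc'; omega
            rw [hdp _ hcS hcnot, Option.getD_some, pvFV_eq_V ts mem pos hmem]
    rw [pvDpLoop, hcell]
    refine ih (PySem.Dict.insert dp m (pvFV ts mem m)) (List.pairwise_cons.mp hpw).2
      (fun x hx => hsub x (by simp [hx])) ?_
    intro c hc hcrest
    rw [PySem.Dict.get?_insert]
    by_cases hcm : c = m
    · rw [if_pos hcm, hcm]
    · rw [if_neg hcm]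
      exact hdp c hc (by simp [hcm, hcrest])

-- B's top value
theorem pvB_value (number : Int) (ts : List Int) (d0 : PySem.Dict Int Int)
    (pos : ∀ t ∈ ts, 1 ≤ t) (h0 : ¬ number = 0) (hneg : ¬ number < 0) :
    (PySem.Dict.get?
      (pvDpLoop ts d0
        (PySem.List.sorted (pvBfs ts d0 (number.toNat + 1) [number] (PySem.Set.ofList [number]))
          (fun x => x) false)
        PySem.Dict.empty) number).getD 0 = pvFV ts d0 number := by
  have hn : 0 < number := by omega
  have hseed : PySem.Set.ofList [number] = [number] := rfl
  rw [hseed]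
  obtain ⟨a, b, c, d, e⟩ := pvBfs_spec ts d0 number pos hn (number.toNat + 1) [number] [number]
    (by simp; omega) (by simp) (by simp) (by intro x hx; simp at hx; omega)
    (by intro x hx hxne; simp at hx; exact absurd hx hxne)
    (fun x h => h) (by intro m hm hms; simp at hm; simp [hm] at hms)
  set S := pvBfs ts d0 (number.toNat + 1) [number] [number] with hS
  set ss := PySem.List.sorted S (fun x => x) false with hss
  have hperm : ss.Perm S := PySem.List.sorted_perm S (fun x => x) false
  have hnd : ss.Nodup := hperm.nodup_iff.mpr b
  have hpwle : ss.Pairwise (fun a b => a ≤ b) := PySem.List.sorted_pairwise S (fun x => x)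
  have hpw : ss.Pairwise (· < ·) := by
    have := hpwle.and hnd
    exact this.imp (fun ⟨u, v⟩ => lt_of_le_of_ne u v)
  have hfin := pvDpLoop_spec ts d0 S pos (fun x hx => (c x hx).1)
    e ss PySem.Dict.empty hpw
    (fun x hx => hperm.mem_iff.mp hx)
    (fun cc hcc hccn => absurd (hperm.mem_iff.mpr hcc) hccn)
  rw [hfin number (a number (by simp)), Option.getD_some]

-- ===== VERDICT (by name: the statement is the Claim_ definition above) =====
theorem break_number_to_ordered_sum_of_terms_spec : Claim_equal_break_number_to_ordered_sum_of_terms := by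
  intro number terms memoize _ hpre
  unfold Spec_break_number_to_ordered_sum_of_terms
  unfold break_number_to_ordered_sum_of_terms break_number_to_ordered_sum_of_terms_alt
  by_cases h0 : number = 0
  · simp [h0]
  · rw [if_neg h0, if_neg h0]
    by_cases hneg : number < 0
    · rw [if_pos hneg, if_pos hneg]
    · rw [if_neg hneg, if_neg hneg]
      simp only []
      have pos : ∀ t ∈ (match terms with
          | none => PySem.List.pyRange 1 (number + 1) 1
          | some ts => ts), 1 ≤ t := by
        cases terms with
        | none =>
          intro t ht
          exact (PySem.List.mem_pyRange_one.mp ht).1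
        | some l =>
          rcases hpre with h | h
          · omega
          · simpa using h
      rw [pvA_value number _ _ pos, pvB_value number _ _ pos h0 hneg]
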